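-- pv_equiv track=rewrite | github.com/bssrdf/pyleet | C/CountSpecialIntegers.py | countSpecialNumbers2
-- ===== SOURCE A (Python) =====
-- from functools import lru_cache
--
-- def countSpecialNumbers2(n: int) -> int:
--     # Digit DP solution
--     s = str(n)
--     @lru_cache(None)
--     def dp(pos, tight, mask):
--         # state:
--         # pos: the position where a digit can be put, [1, len(s)]
--         # tight: whether there is constraint on which digit can be picked: 0/1
--         # mask: indicate which digit has been picked [0, 2^10]
--         if pos == len(s): return int(mask != 0)
--         ans = 0
--         if tight == 1:
--             for i in range(ord(s[pos]) - ord('0')+1):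
--                 if mask & (1 << i) > 0: continue
--                 newmask = mask if mask == 0 and i == 0 else (mask | (1<<i))
--                 if i == ord(s[pos]) - ord('0'):
--                     ans += dp(pos+1, 1, newmask)
--                 else:
--                     ans += dp(pos+1, 0, newmask)
--         else:
--             for i in range(10):
--                 if mask & (1 << i) > 0: continue
--                 newmask = mask if mask == 0 and i == 0 else (mask | (1<<i))
--                 ans += dp(pos+1, 0, newmask)
--         return ans
--     return dp(0, 1, 0)
-- ===== SOURCE B (Python) =====
-- def countSpecialNumbers2(n: int) -> int:
--     # Combinatorial closed form: count lengths below len(str(n)) with falling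
--     # factorials, then scan the digits of n left to right with a used-digit set.
--     if n <= 0:
--         return 0
--
--     def P(m, k):
--         # falling factorial m*(m-1)*...*(m-k+1)
--         r = 1
--         for j in range(k):
--             r *= m - j
--         return r
--
--     s = str(n)
--     L = len(s)
--     total = sum(9 * P(9, l - 1) for l in range(1, L))
--     used = set()
--     for i, ch in enumerate(s):
--         d = int(ch)
--         lo = 1 if i == 0 else 0
--         total += sum(P(9 - i, L - 1 - i) for y in range(lo, d) if y not in used)
--         if d in used:
--             return total
--         used.add(d)
--     return total + 1
-- ===== Notes on version B (the rewrite author's own statement) =====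
-- stated objective: simpler
-- what changed: Replaces the exponential-state memoized digit DP (position x tight x bitmask) by a direct combinatorial count: falling-factorial counts of all-distinct-digit numbers for every shorter length plus one left-to-right scan of the digits of n maintaining a set of used digits.
import Mathlib
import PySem

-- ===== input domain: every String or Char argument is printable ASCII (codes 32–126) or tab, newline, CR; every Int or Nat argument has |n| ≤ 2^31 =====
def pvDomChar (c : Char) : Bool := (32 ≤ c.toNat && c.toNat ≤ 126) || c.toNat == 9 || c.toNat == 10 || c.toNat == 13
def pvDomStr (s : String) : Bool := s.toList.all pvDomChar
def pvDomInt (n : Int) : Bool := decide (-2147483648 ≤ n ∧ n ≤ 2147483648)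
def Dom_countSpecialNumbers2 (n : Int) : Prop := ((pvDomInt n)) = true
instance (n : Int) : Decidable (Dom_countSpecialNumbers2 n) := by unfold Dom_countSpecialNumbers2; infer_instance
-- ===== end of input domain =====

-- B replaces A's memoized digit DP by a combinatorial closed form (falling-factorial
-- counts for shorter lengths plus one left-to-right scan of the digits); objective: simpler.

-- ===== PORT A =====
-- dp(pos, tight, mask) ported as recursion on the character suffix of str(n);
-- the two Python 'for' loops are folds over the same ranges (lru_cache only memoizes).
def dpA : List Char → Bool → Nat → Int
  | [], _, mask => if mask ≠ 0 then 1 else 0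
  | c :: rest, tight, mask =>
    if tight then
      (PySem.List.pyRange 0 ((c.toNat : Int) - 48 + 1)).foldl (fun ans (i : Int) =>
        if mask &&& (1 <<< i.toNat) > 0 then ans
        else if i = (c.toNat : Int) - 48 then
          ans + dpA rest true (if mask = 0 ∧ i = 0 then mask else mask ||| (1 <<< i.toNat))
        else
          ans + dpA rest false (if mask = 0 ∧ i = 0 then mask else mask ||| (1 <<< i.toNat))) 0
    else
      (PySem.List.pyRange 0 10).foldl (fun ans (i : Int) =>
        if mask &&& (1 <<< i.toNat) > 0 then ans
        else ans + dpA rest false (if mask = 0 ∧ i = 0 then mask else mask ||| (1 <<< i.toNat))) 0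
  termination_by structural s => s

def countSpecialNumbers2 (n : Int) : Int := dpA (PySem.Int.toChars n) true 0

-- ===== PORT B =====
-- falling factorial P(m, k) of Source B (loop 'r *= m - j' over range(k))
def permB (m k : Int) : Int := (PySem.List.pyRange 0 k).foldl (fun r (j : Int) => r * (m - j)) 1

-- the scan loop of Source B (early return on a repeated digit → recursion);
-- int(ch) is ported as ch.toNat - 48, exact on the digit characters of str(n)
def scanB : List Char → Int → Int → PySem.Set Int → Int → Int
  | [], _, _, _, total => total + 1
  | ch :: rest, i, L, used, total =>
    let d : Int := (ch.toNat : Int) - 48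
    let lo : Int := if i = 0 then 1 else 0
    let total' := total + (PySem.List.pyRange lo d).foldl
        (fun t (y : Int) => if PySem.Set.contains used y then t else t + permB (9 - i) (L - 1 - i)) 0
    if PySem.Set.contains used d then total'
    else scanB rest (i + 1) L (PySem.Set.add used d) total'

def countSpecialNumbers2_alt (n : Int) : Int :=
  if n ≤ 0 then 0
  else
    let s := PySem.Int.toChars n
    let L : Int := s.length
    let total := (PySem.List.pyRange 1 L).foldl (fun t (l : Int) => t + 9 * permB 9 (l - 1)) 0
    scanB s 0 L PySem.Set.empty total

-- ===== PRECONDITION & SPEC =====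
def Spec_countSpecialNumbers2 (n : Int) (out : Int) : Prop := out = countSpecialNumbers2_alt n
instance (n : Int) (out : Int) : Decidable (Spec_countSpecialNumbers2 n out) := by unfold Spec_countSpecialNumbers2; infer_instance

-- ===== CLAIM (what is proved, stated in full; the proofs are below) =====
def Claim_equal_countSpecialNumbers2 : Prop := ∀ (n : Int), Dom_countSpecialNumbers2 n → Spec_countSpecialNumbers2 n (countSpecialNumbers2 n)

-- ===== LEMMAS AND PROOFS =====

-- `cnt mask` = number of digits 0..9 whose bit is set in `mask`, phrased with the ports' own bit test
def cnt (mask : Nat) : Nat :=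
  ((PySem.List.pyRange 0 10).filter (fun i => decide (mask &&& (1 <<< i.toNat) > 0))).length

-- the loose (tight = 0) branch of dp depends only on the number of remaining positions
def F : Nat → Nat → Int
  | 0, mask => if mask ≠ 0 then 1 else 0
  | k+1, mask =>
    (PySem.List.pyRange 0 10).foldl (fun ans (i : Int) =>
      if mask &&& (1 <<< i.toNat) > 0 then ans
      else ans + F k (if mask = 0 ∧ i = 0 then mask else mask ||| (1 <<< i.toNat))) 0

-- falling factorial m·(m−1)·…·(m−k+1), recursion on the left factor
def P : Int → Nat → Int
  | _, 0 => 1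
  | m, k+1 => m * P (m - 1) k

set_option maxRecDepth 100000 in
lemma cnt_incr : ∀ mask : Nat, mask < 1024 → ∀ j : Nat, j < 10 → ¬ (mask &&& (1 <<< j) > 0) →
    cnt (mask ||| (1 <<< j)) = cnt mask + 1 := by decide

set_option maxRecDepth 100000 in
lemma cnt_pos : ∀ mask : Nat, mask < 1024 → mask ≠ 0 → 1 ≤ cnt mask := by decide

lemma cnt_le (mask : Nat) : cnt mask ≤ 10 := by
  have h := List.length_filter_le (fun i => decide (mask &&& (1 <<< i.toNat) > 0)) (PySem.List.pyRange 0 10)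
  simpa [cnt] using h

lemma free_len' (mask : Nat) :
    ((PySem.List.pyRange 0 10).filter (fun i => !decide (mask &&& (1 <<< i.toNat) > 0))).length
      = 10 - cnt mask := by
  have h := List.length_eq_length_filter_add (l := PySem.List.pyRange 0 10)
      (fun i => decide (mask &&& (1 <<< i.toNat) > 0))
  have hl : (PySem.List.pyRange 0 10 : List Int).length = 10 := by decide
  unfold cnt; omega

lemma P_succ_right' (m : Int) (k : Nat) : P m (k+1) = P m k * (m - k) := by
  induction k generalizing m with
  | zero => simp [P]
  | succ k ih =>
    rw [show P m (k+1+1) = m * P (m-1) (k+1) from rfl, ih (m-1),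
        show P m (k+1) = m * P (m-1) k from rfl]
    push_cast; ring

lemma permB_eq' (m : Int) (k : Nat) : permB m (k : Int) = P m k := by
  induction k with
  | zero => simp [permB, P]
  | succ k ih =>
    unfold permB at *
    rw [show ((k+1 : Nat) : Int) = (k : Int) + 1 by push_cast; ring,
        PySem.List.pyRange_one_succ_right (by positivity), List.foldl_append, ih,
        P_succ_right']
    simp

lemma shift_lt (i : Int) (h : i ∈ PySem.List.pyRange 0 10) : (1 : Nat) <<< i.toNat < 1024 := by
  rw [PySem.List.mem_pyRange_one] at h
  rw [Nat.one_shiftLeft]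
  calc 2 ^ i.toNat ≤ 2 ^ 9 := Nat.pow_le_pow_right (by norm_num) (by omega)
    _ < 1024 := by norm_num

lemma dpA_false' (rest : List Char) (mask : Nat) : dpA rest false mask = F rest.length mask := by
  induction rest generalizing mask with
  | nil => rfl
  | cons c rest ih =>
    simp only [dpA, F, List.length_cons, Bool.false_eq_true, if_false]
    apply PySem.List.foldl_congr_mem
    intro acc i hi
    by_cases hb : mask &&& (1 <<< i.toNat) > 0 <;> simp [hb, ih]

lemma F_pos' (k : Nat) : ∀ mask : Nat, mask ≠ 0 → mask < 1024 →
    F k mask = P ((10 : Int) - cnt mask) k := by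
  induction k with
  | zero => intro mask h0 _; simp [F, P, h0]
  | succ k ih =>
    intro mask h0 hm
    have hstep : F (k+1) mask = (PySem.List.pyRange 0 10).foldl (fun ans (i : Int) =>
        if mask &&& (1 <<< i.toNat) > 0 then ans
        else ans + P ((9 : Int) - cnt mask) k) 0 := by
      show (PySem.List.pyRange 0 10).foldl _ 0 = _
      apply PySem.List.foldl_congr_mem
      intro acc i hi
      by_cases hb : mask &&& (1 <<< i.toNat) > 0
      · simp [hb]
      · have hi' := (PySem.List.mem_pyRange_one).1 hi
        have hlt : (1 : Nat) <<< i.toNat < 1024 := shift_lt i hi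
        have hnz : mask ||| (1 <<< i.toNat) ≠ 0 := by
          have := Nat.left_le_or (n := mask) (m := 1 <<< i.toNat); omega
        have hcnt : cnt (mask ||| (1 <<< i.toNat)) = cnt mask + 1 := by
          apply cnt_incr mask hm i.toNat (by omega) hb
        have := ih (mask ||| (1 <<< i.toNat)) hnz (Nat.or_lt_two_pow (n := 10) hm hlt)
        rw [hcnt] at this
        simp only [hb, if_false, h0, false_and]
        rw [this]
        norm_num
        congr 1
        ring
    rw [hstep]
    have hstep2 : (PySem.List.pyRange 0 10).foldl (fun ans (i : Int) =>
        if mask &&& (1 <<< i.toNat) > 0 then ans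
        else ans + P ((9 : Int) - cnt mask) k) 0
        = (PySem.List.pyRange 0 10).foldl (fun ans (i : Int) =>
        if ¬ (mask &&& (1 <<< i.toNat) > 0) then ans + P ((9 : Int) - cnt mask) k
        else ans) 0 := by
      apply PySem.List.foldl_congr_mem
      intro acc i _
      by_cases hb : mask &&& (1 <<< i.toNat) > 0 <;> simp [hb]
    rw [hstep2, PySem.List.foldl_ite_eq_foldl_filter, PySem.List.foldl_add]
    rw [PySem.List.sum_map_const_int]
    have : (List.filter (fun x : Int => decide ¬(mask &&& (1 <<< x.toNat) > 0)) (PySem.List.pyRange 0 10)).length = 10 - cnt mask := by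
      rw [← free_len' mask]
      congr 1
      apply List.filter_congr
      intro x _
      by_cases h : mask &&& 1 <<< x.toNat = 0 <;> simp [h, Nat.pos_iff_ne_zero]
    rw [this]
    have hle := cnt_le mask
    rw [show P ((10:Int) - cnt mask) (k+1) = ((10:Int) - cnt mask) * P ((10:Int) - cnt mask - 1) k from rfl]
    rw [show ((10:Int) - cnt mask - 1) = (9:Int) - cnt mask by ring]
    rw [show ((10 - cnt mask : Nat) : Int) = (10:Int) - cnt mask by omega]
    ring

lemma F_zero_succ' (k : Nat) : F (k+1) 0 = F k 0 + 9 * P 9 k := by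
  have h1 : F (k+1) 0 = (PySem.List.pyRange 0 10).foldl (fun ans (i : Int) =>
      if i = 0 then ans + F k 0 else ans + P 9 k) 0 := by
    show (PySem.List.pyRange 0 10).foldl _ 0 = _
    apply PySem.List.foldl_congr_mem
    intro acc i hi
    have hi' := (PySem.List.mem_pyRange_one).1 hi
    have hg : ¬ ((0:Nat) &&& (1 <<< i.toNat) > 0) := by simp [Nat.zero_and]
    by_cases h : i = 0
    · simp [h]
    · have hlt : (1 : Nat) <<< i.toNat < 1024 := shift_lt i hi
      have hnz : (0:Nat) ||| (1 <<< i.toNat) ≠ 0 := by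
        simp [Nat.one_shiftLeft]
      have hcnt : cnt ((0:Nat) ||| (1 <<< i.toNat)) = 1 := by
        rw [cnt_incr 0 (by norm_num) i.toNat (by omega) (by simp [Nat.zero_and])]
        decide
      have := F_pos' k ((0:Nat) ||| (1 <<< i.toNat)) hnz (by simpa using hlt)
      rw [hcnt] at this
      simp only [hg, if_false, h, and_false]
      rw [this]
      norm_num
  have h2 : ∀ init : Int, (PySem.List.pyRange 1 10).foldl (fun ans (i : Int) =>
      if i = 0 then ans + F k 0 else ans + P 9 k) init
      = init + 9 * P 9 k := by
    intro init
    have hc : (PySem.List.pyRange 1 10).foldl (fun ans (i : Int) =>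
        if i = 0 then ans + F k 0 else ans + P 9 k) init
        = (PySem.List.pyRange 1 10).foldl (fun ans (i : Int) => ans + P 9 k) init := by
      apply PySem.List.foldl_congr_mem
      intro acc i hi
      have hi' := (PySem.List.mem_pyRange_one).1 hi
      simp [show i ≠ 0 by omega]
    rw [hc, PySem.List.foldl_add, PySem.List.sum_map_const_int]
    have h9 : (PySem.List.pyRange (1:Int) 10).length = 9 := by decide
    rw [h9]; ring
  rw [h1, PySem.List.pyRange_one_cons (by norm_num : (0:Int) < 10)]
  norm_num [List.foldl_cons]
  rw [h2]

lemma SB' (k : Nat) :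
    (PySem.List.pyRange 1 ((k : Int) + 1)).foldl (fun t (l : Int) => t + 9 * permB 9 (l - 1)) 0
      = F k 0 := by
  induction k with
  | zero => decide
  | succ k ih =>
    rw [show ((k+1 : Nat) : Int) + 1 = ((k:Int) + 1) + 1 by push_cast; ring,
        PySem.List.pyRange_one_succ_right (by omega), List.foldl_append, ih]
    simp only [List.foldl_cons, List.foldl_nil]
    rw [show ((k:Int) + 1 - 1) = ((k:Nat):Int) by ring, permB_eq', F_zero_succ']

lemma toDigitsCore_shape' : ∀ (f n : Nat) (ds : List Char), 0 < f → n < 10 ^ f →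
    ∃ c cs, Nat.toDigitsCore 10 f n ds = c :: (cs ++ ds)
      ∧ (∀ x ∈ c :: cs, 48 ≤ x.toNat ∧ x.toNat ≤ 57)
      ∧ (n ≠ 0 → c.toNat ≠ 48) := by
  intro f
  induction f with
  | zero => omega
  | succ f ih =>
    intro n ds _ hn
    have hd : (n % 10).digitChar.toNat = 48 + n % 10 ∧ (n % 10 ≠ 0 → (n % 10).digitChar.toNat ≠ 48) := by
      have h10 : n % 10 < 10 := Nat.mod_lt _ (by norm_num)
      interval_cases h : n % 10 <;> simp [Nat.digitChar]
    by_cases hq : n / 10 = 0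
    · refine ⟨(n % 10).digitChar, [], ?_, ?_, ?_⟩
      · show Nat.toDigitsCore 10 (f+1) n ds = _
        rw [Nat.toDigitsCore]
        simp [hq]
      · intro x hx
        simp at hx
        subst hx
        have h10 : n % 10 < 10 := Nat.mod_lt _ (by norm_num)
        omega
      · intro h0
        exact hd.2 (by omega)
    · have hf : 0 < f := by
        by_contra h
        have : f = 0 := by omega
        subst this
        simp at hn
        omega
      obtain ⟨c, cs, heq, hcodes, hhead⟩ := ih (n / 10) ((n % 10).digitChar :: ds) hf (by
        apply Nat.div_lt_of_lt_mul
        calc n < 10 ^ (f+1) := hn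
          _ = 10 * 10 ^ f := by ring)
      refine ⟨c, cs ++ [(n % 10).digitChar], ?_, ?_, fun _ => hhead hq⟩
      · show Nat.toDigitsCore 10 (f+1) n ds = _
        rw [Nat.toDigitsCore]
        simp [hq, heq]
      · intro x hx
        simp at hx
        have h10 : n % 10 < 10 := Nat.mod_lt _ (by norm_num)
        rcases hx with h | h | h
        · rw [h]; exact hcodes _ (by simp)
        · exact hcodes x (by simp [h])
        · rw [h]; omega

lemma toChars_pos' (n : Int) (hn : 0 < n) :
    ∃ c cs, PySem.Int.toChars n = c :: cs
      ∧ (∀ x ∈ c :: cs, 48 ≤ x.toNat ∧ x.toNat ≤ 57)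
      ∧ 49 ≤ c.toNat := by
  have h1 : PySem.Int.toChars n = Nat.toDigits 10 n.toNat := by
    unfold PySem.Int.toChars
    rw [if_neg (by omega)]
  have hlt : n.toNat < 10 ^ (n.toNat + 1) :=
    lt_of_lt_of_le (Nat.lt_pow_self (by norm_num)) (Nat.pow_le_pow_right (by norm_num) (by omega))
  obtain ⟨c, cs, heq, hcodes, hhead⟩ := toDigitsCore_shape' (n.toNat + 1) n.toNat [] (by omega) hlt
  refine ⟨c, cs, ?_, hcodes, ?_⟩
  · rw [h1, Nat.toDigits, heq]; simp
  · have := hcodes c (by simp)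
    have := hhead (by omega)
    omega

lemma bit_or_iff (m j i : Nat) :
    ((m ||| (1 <<< j)) &&& (1 <<< i) > 0) ↔ (m &&& (1 <<< i) > 0 ∨ i = j) := by
  simp only [Nat.one_shiftLeft, Nat.and_two_pow, Nat.testBit_or, Nat.testBit_two_pow]
  by_cases hb : m.testBit i <;> by_cases hj : j = i <;> simp [hb, hj, eq_comm]

lemma shift_lt' (j : Nat) (h : j < 10) : (1 : Nat) <<< j < 1024 := by
  rw [Nat.one_shiftLeft]
  calc 2 ^ j ≤ 2 ^ 9 := Nat.pow_le_pow_right (by norm_num) (by omega)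
    _ < 1024 := by norm_num

lemma tight_eq' : ∀ (ds : List Char) (used : List Int) (mask : Nat) (L total : Int),
    (∀ c ∈ ds, 48 ≤ c.toNat ∧ c.toNat ≤ 57) →
    mask < 1024 → mask ≠ 0 →
    (∀ y : Int, PySem.Set.contains used y = true ↔ (0 ≤ y ∧ y < 10 ∧ mask &&& (1 <<< y.toNat) > 0)) →
    used.length = cnt mask →
    L = used.length + ds.length →
    scanB ds (used.length : Int) L used total = total + dpA ds true mask := by
  intro ds
  induction ds with
  | nil =>
    intro used mask L total _ _ h0 _ _ _
    simp [scanB, dpA, h0]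
  | cons ch rest ih =>
    intro used mask L total hcodes hm h0 hmem hcnt hL
    have hch := hcodes ch (by simp)
    have hipos : 1 ≤ used.length := by
      have := cnt_pos mask hm h0; omega
    simp only [scanB, dpA, if_true]
    set d : Int := (ch.toNat : Int) - 48 with hd
    have hd0 : 0 ≤ d ∧ d ≤ 9 := by omega
    have hdN : d.toNat < 10 := by omega
    rw [if_neg (show ¬ ((used.length : Int) = 0) by omega)]
    have hLrest : L - 1 - (used.length : Int) = (rest.length : Int) := by
      rw [hL]; push_cast [List.length_cons]; ring
    -- the tight loop's body, and the common value of both partial sums below d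
    set f : Int → Int → Int := fun ans (i : Int) =>
        if mask &&& (1 <<< i.toNat) > 0 then ans
        else if i = d then
          ans + dpA rest true (if mask = 0 ∧ i = 0 then mask else mask ||| (1 <<< i.toNat))
        else
          ans + dpA rest false (if mask = 0 ∧ i = 0 then mask else mask ||| (1 <<< i.toNat))
      with hf
    have hBfold : (PySem.List.pyRange 0 d).foldl
        (fun t (y : Int) => if PySem.Set.contains used y then t
          else t + permB (9 - (used.length : Int)) (L - 1 - (used.length : Int))) 0
        = (PySem.List.pyRange 0 d).foldl f 0 := by
      apply PySem.List.foldl_congr_mem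
      intro acc y hy
      have hy' := (PySem.List.mem_pyRange_one).1 hy
      simp only [hf]
      by_cases hb : mask &&& (1 <<< y.toNat) > 0
      · have hc : PySem.Set.contains used y = true := (hmem y).2 ⟨hy'.1, by omega, hb⟩
        rw [hc, if_pos rfl, if_pos hb]
      · have hc : PySem.Set.contains used y = false := by
          rcases h : PySem.Set.contains used y with _ | _
          · rfl
          · exact absurd ((hmem y).1 h).2.2 hb
        rw [hc, if_neg (by simp), if_neg hb, if_neg (show ¬ y = d by omega),
            if_neg (fun hh => h0 hh.1)]
        have hnz : mask ||| (1 <<< y.toNat) ≠ 0 := by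
          have := Nat.left_le_or (n := mask) (m := 1 <<< y.toNat); omega
        have hlt : mask ||| (1 <<< y.toNat) < 1024 :=
          Nat.or_lt_two_pow (n := 10) hm (shift_lt' y.toNat (by omega))
        have hF := F_pos' rest.length (mask ||| (1 <<< y.toNat)) hnz hlt
        rw [cnt_incr mask hm y.toNat (by omega) hb] at hF
        rw [hLrest, hcnt, permB_eq', dpA_false', hF]
        congr 2
        push_cast; ring
    rw [hBfold]
    rw [show d + 1 = d + 1 from rfl, PySem.List.pyRange_one_succ_right hd0.1, List.foldl_append]
    set S : Int := (PySem.List.pyRange 0 d).foldl f 0 with hS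
    simp only [List.foldl_cons, List.foldl_nil, hf]
    by_cases hb : mask &&& (1 <<< d.toNat) > 0
    · have hcont : PySem.Set.contains used d = true := (hmem d).2 ⟨hd0.1, by omega, hb⟩
      rw [hcont, if_pos rfl, if_pos hb]
    · have hcont : PySem.Set.contains used d = false := by
        rcases h : PySem.Set.contains used d with _ | _
        · rfl
        · exact absurd ((hmem d).1 h).2.2 hb
      rw [hcont, if_neg (by simp), if_neg hb]
      simp only [if_true]
      rw [if_neg (fun hh => h0 hh.1)]
      have hadd : PySem.Set.add used d = used ++ [d] := by
        unfold PySem.Set.add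
        rw [hcont]
        simp
      have hnz : mask ||| (1 <<< d.toNat) ≠ 0 := by
        have := Nat.left_le_or (n := mask) (m := 1 <<< d.toNat); omega
      have hlt : mask ||| (1 <<< d.toNat) < 1024 :=
        Nat.or_lt_two_pow (n := 10) hm (shift_lt' d.toNat hdN)
      have hmem' : ∀ y : Int, PySem.Set.contains (used ++ [d]) y = true ↔
          (0 ≤ y ∧ y < 10 ∧ (mask ||| (1 <<< d.toNat)) &&& (1 <<< y.toNat) > 0) := by
        intro y
        unfold PySem.Set.contains at *
        rw [List.contains_append]
        constructor
        · intro h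
          rcases Bool.or_eq_true_iff.1 h with h | h
          · have := (hmem y).1 h
            refine ⟨this.1, this.2.1, ?_⟩
            rw [bit_or_iff]
            exact Or.inl this.2.2
          · have : y = d := by
              have := List.contains_iff_mem.1 h
              simpa using this
            subst this
            refine ⟨hd0.1, by omega, ?_⟩
            rw [bit_or_iff]
            exact Or.inr rfl
        · rintro ⟨hy0, hy10, hbit⟩
          rw [bit_or_iff] at hbit
          rcases hbit with hbit | hbit
          · rw [(hmem y).2 ⟨hy0, hy10, hbit⟩]; simp
          · have : y = d := by omega
            subst this
            simp
      have hcnt' : (used ++ [d]).length = cnt (mask ||| (1 <<< d.toNat)) := by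
        rw [cnt_incr mask hm d.toNat hdN hb]
        simp [hcnt]
      have hL' : L = ((used ++ [d]).length : Int) + rest.length := by
        rw [hL]; push_cast [List.length_cons, List.length_append, List.length_nil]; ring
      have hIH := ih (used ++ [d]) (mask ||| (1 <<< d.toNat)) L (total + S)
        (fun c hc => hcodes c (by simp [hc])) hlt hnz hmem' hcnt' hL'
      rw [hadd, show (used.length : Int) + 1 = ((used ++ [d]).length : Int) by
            push_cast [List.length_append, List.length_cons, List.length_nil]; ring,
          hIH]
      ring

lemma cnt_zero : cnt 0 = 0 := by decide

lemma singleton_mem (j : Nat) (hj : j < 10) (y : Int) :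
    PySem.Set.contains [(j : Int)] y = true ↔
      (0 ≤ y ∧ y < 10 ∧ (1 <<< j) &&& (1 <<< y.toNat) > 0) := by
  have hbit : ((1 <<< j) &&& (1 <<< y.toNat) > 0) ↔ (y.toNat = j) := by
    have := bit_or_iff 0 j y.toNat
    simpa [Nat.zero_or, Nat.zero_and] using this
  unfold PySem.Set.contains
  rw [List.contains_iff_mem, hbit]
  simp only [List.mem_singleton]
  omega

-- ===== VERDICT (by name: the statement is the Claim_ definition above) =====
theorem countSpecialNumbers2_spec : Claim_equal_countSpecialNumbers2 := by
  unfold Claim_equal_countSpecialNumbers2 Spec_countSpecialNumbers2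
  intro n _
  by_cases hneg : n ≤ 0
  · have hB : countSpecialNumbers2_alt n = 0 := by
      unfold countSpecialNumbers2_alt; rw [if_pos hneg]
    rw [hB]
    rcases eq_or_lt_of_le hneg with h | h
    · rw [h]; decide
    · unfold countSpecialNumbers2 PySem.Int.toChars
      rw [if_pos h]
      simp only [dpA, if_true]
      rw [show PySem.List.pyRange 0 (('-'.toNat : Int) - 48 + 1) = [] from by decide]
      rfl
  · have hn : 0 < n := by omega
    obtain ⟨c, cs, hs, hcodes, hc49⟩ := toChars_pos' n hn
    have hc57 := (hcodes c (by simp)).2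
    unfold countSpecialNumbers2 countSpecialNumbers2_alt
    rw [if_neg hneg]
    simp only [hs, scanB, dpA, if_true, List.length_cons]
    set d0 : Int := (c.toNat : Int) - 48 with hd0def
    have hd0 : 1 ≤ d0 ∧ d0 ≤ 9 := by omega
    have hd0N : d0.toNat < 10 := by omega
    set m1 : Nat := 1 <<< d0.toNat with hm1
    have hm1lt : m1 < 1024 := shift_lt' d0.toNat hd0N
    have hm1nz : m1 ≠ 0 := by
      rw [hm1, Nat.one_shiftLeft]; positivity
    have hcnt1 : cnt m1 = 1 := by
      have := cnt_incr 0 (by norm_num) d0.toNat hd0N (by simp [Nat.zero_and])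
      rw [Nat.zero_or] at this
      rw [hm1, this, cnt_zero]
    -- the length of str(n) as an Int
    have hLcast : ((cs.length + 1 : Nat) : Int) = (cs.length : Int) + 1 := by push_cast; ring
    rw [hLcast]
    -- B's prefix total is the loose dp value with an untouched mask
    rw [SB' cs.length]
    -- B's first-position partial sum
    have hBfold : (PySem.List.pyRange 1 d0).foldl
        (fun t (y : Int) => if PySem.Set.contains PySem.Set.empty y then t
          else t + permB (9 - (0:Int)) ((cs.length : Int) + 1 - 1 - 0)) 0
        = ((PySem.List.pyRange 1 d0).length : Int) * P 9 cs.length := by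
      have hcong : (PySem.List.pyRange 1 d0).foldl
          (fun t (y : Int) => if PySem.Set.contains PySem.Set.empty y then t
            else t + permB (9 - (0:Int)) ((cs.length : Int) + 1 - 1 - 0)) 0
          = (PySem.List.pyRange 1 d0).foldl (fun t (_ : Int) => t + P 9 cs.length) 0 := by
        apply PySem.List.foldl_congr_mem
        intro acc y _
        rw [show PySem.Set.contains PySem.Set.empty y = false from rfl]
        rw [if_neg (by simp)]
        rw [show (9 - (0:Int)) = ((9:Int)) by ring,
            show ((cs.length : Int) + 1 - 1 - 0) = ((cs.length : Nat) : Int) by ring,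
            permB_eq']
      rw [hcong, PySem.List.foldl_add, PySem.List.sum_map_const_int]
      ring
    rw [hBfold]
    rw [show PySem.Set.contains PySem.Set.empty d0 = false from rfl]
    simp only [Bool.false_eq_true, if_false]
    have hadd0 : PySem.Set.add PySem.Set.empty d0 = [d0] := rfl
    rw [hadd0]
    -- fold the tail with the tight lemma
    have hd0cast : d0 = ((d0.toNat : Nat) : Int) := by omega
    have htight := tight_eq' cs [d0] m1 ((cs.length : Int) + 1) (F cs.length 0 +
        ((PySem.List.pyRange 1 d0).length : Int) * P 9 cs.length)
      (fun x hx => hcodes x (by simp [hx]))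
      hm1lt hm1nz
      (by intro y; rw [hm1, hd0cast]; exact singleton_mem d0.toNat hd0N y)
      (by simp [hcnt1])
      (by simp; ring)
    simp only [List.length_singleton, Nat.cast_one] at htight
    rw [show (0:Int) + 1 = 1 from by ring, htight]
    -- now compute A's tight scan over the first digit
    rw [PySem.List.pyRange_one_succ_right (by omega : (0:Int) ≤ d0), List.foldl_append,
        PySem.List.pyRange_one_cons (by omega : (0:Int) < d0)]
    simp only [List.foldl_cons, List.foldl_nil, if_true, true_and]
    rw [if_neg (show ¬ ((0:Nat) &&& 1 <<< Int.toNat (0:Int) > 0) from by decide)]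
    rw [dpA_false']
    rw [if_neg (show ¬ (d0 = 0) from by omega)]
    rw [Nat.zero_or, ← hm1]
    rw [show (0:Int) + 1 = 1 from by norm_num]
    have hmid : (PySem.List.pyRange 1 d0).foldl
        (fun ans (i : Int) =>
          if (0:Nat) &&& (1 <<< i.toNat) > 0 then ans
          else if i = d0 then
            ans + dpA cs true (if i = 0 then (0:Nat) else 0 ||| (1 <<< i.toNat))
          else
            ans + dpA cs false (if i = 0 then (0:Nat) else 0 ||| (1 <<< i.toNat)))
        (0 + F cs.length 0)
        = (PySem.List.pyRange 1 d0).foldl (fun ans (_ : Int) => ans + P 9 cs.length)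
          (0 + F cs.length 0) := by
      apply PySem.List.foldl_congr_mem
      intro acc y hy
      have hy' := (PySem.List.mem_pyRange_one).1 hy
      rw [if_neg (by simp [Nat.zero_and]), if_neg (show ¬ y = d0 by omega),
          if_neg (show ¬ y = 0 by omega), Nat.zero_or, dpA_false']
      have hnz : (1:Nat) <<< y.toNat ≠ 0 := by
        rw [Nat.one_shiftLeft]; positivity
      have hlt : (1:Nat) <<< y.toNat < 1024 := shift_lt' y.toNat (by omega)
      rw [F_pos' cs.length _ hnz hlt]
      have hc1 : cnt ((1:Nat) <<< y.toNat) = 1 := by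
        have := cnt_incr 0 (by norm_num) y.toNat (by omega) (by simp [Nat.zero_and])
        rw [Nat.zero_or] at this
        rw [this, cnt_zero]
      rw [hc1]
      norm_num
    rw [if_neg (show ¬ ((0:Nat) &&& m1 > 0) from by simp [Nat.zero_and]),
        if_neg (show ¬ ((0:Int) = d0) from by omega)]
    rw [hmid, PySem.List.foldl_add, PySem.List.sum_map_const_int]
    ring
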